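-- pv_equiv track=rewrite | github.com/pypi-data/pypi-mirror-374 | packages/logillm/logillm-0.2.9.tar.gz/logillm-0.2.9/logillm/core/signatures/parser.py | _split_on_colon
-- ===== SOURCE A (Python) =====
-- def _split_on_colon(field_def: str) -> tuple[str, str]:
--     """Split a field definition on the first colon not inside brackets.
--
--     Example: "items: list[dict[str, int]]" -> ("items", "list[dict[str, int]]")
--     """
--     bracket_depth = 0
--
--     for i, char in enumerate(field_def):
--         if char == "[":
--             bracket_depth += 1
--         elif char == "]":
--             bracket_depth -= 1
--         elif char == ":" and bracket_depth == 0: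
--             return field_def[:i], field_def[i + 1 :]
--
--     raise ValueError(f"No colon found in field definition: '{field_def}'")
-- ===== SOURCE B (Python) =====
-- def _split_on_colon(field_def: str) -> tuple[str, str]:
--     """Split a field definition on the first colon not inside brackets."""
--     parts = field_def.split(":")
--     prefix = parts[0]
--     depth = prefix.count("[") - prefix.count("]")
--     for j in range(1, len(parts)):
--         if depth == 0:
--             return prefix, ":".join(parts[j:])
--         prefix += ":" + parts[j]
--         depth += parts[j].count("[") - parts[j].count("]")
--     raise ValueError(f"No colon found in field definition: '{field_def}'")
-- ===== Notes on version B (the rewrite author's own statement) =====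
-- stated objective: alternative
-- what changed: B replaces A's single character-by-character bracket-depth scan with a split(':')-then-rejoin decomposition: it splits once on ':', walks the colon-separated parts keeping a running depth and reconstructed prefix, and joins the remaining parts for the suffix.
import Mathlib
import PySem

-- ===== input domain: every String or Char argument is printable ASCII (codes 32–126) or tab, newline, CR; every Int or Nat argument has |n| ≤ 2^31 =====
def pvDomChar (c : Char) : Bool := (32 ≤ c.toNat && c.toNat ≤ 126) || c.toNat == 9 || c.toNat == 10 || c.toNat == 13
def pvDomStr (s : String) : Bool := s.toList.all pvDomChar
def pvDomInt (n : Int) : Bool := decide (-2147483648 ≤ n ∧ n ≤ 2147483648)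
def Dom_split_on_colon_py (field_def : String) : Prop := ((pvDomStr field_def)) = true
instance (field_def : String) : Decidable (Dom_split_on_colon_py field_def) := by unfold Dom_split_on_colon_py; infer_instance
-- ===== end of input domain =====

-- B replaces A's per-character scan with a split-on-':' / join decomposition over colon-separated
-- parts (objective: alternative decomposition, same linear cost). Return-value equivalence only;
-- where Python A raises ValueError (no bracket-free colon) both ports return a dummy pair and Pre_ excludes those inputs.

-- ===== PORT A =====
-- for i, char in enumerate(field_def): bracket-depth scan; `some i` = the return index.
def pvLoopA : List Char → Nat → Int → Option Nat
  | [], _, _ => none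
  | c :: rest, i, depth =>
    if c = '[' then pvLoopA rest (i + 1) (depth + 1)
    else if c = ']' then pvLoopA rest (i + 1) (depth - 1)
    else if c = ':' ∧ depth = 0 then some i
    else pvLoopA rest (i + 1) depth

def split_on_colon_py (field_def : String) : String × String :=
  match pvLoopA field_def.toList 0 0 with
  -- field_def[:i] / field_def[i+1:] : exact as take/drop since 0 ≤ i < len here
  | some i => (String.ofList (field_def.toList.take i), String.ofList (field_def.toList.drop (i + 1)))
  | none => ("", "")  -- Python raises ValueError here; excluded by Pre_

-- ===== PORT B =====
-- field_def.split(":")  (exact port of str.split with a one-char separator)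
def pvSplitC : List Char → List (List Char)
  | [] => [[]]
  | c :: rest =>
    match pvSplitC rest with
    | [] => [[]]  -- unreachable: pvSplitC never returns []
    | h :: t => if c = ':' then [] :: h :: t else (c :: h) :: t

-- ":".join(parts)  (exact port of str.join with a one-char separator)
def pvJoinC : List (List Char) → List Char
  | [] => []
  | [p] => p
  | p :: q :: t => p ++ ':' :: pvJoinC (q :: t)

-- p.count("[") - p.count("]")
def pvCnt (p : List Char) : Int := (p.count '[' : Int) - (p.count ']' : Int)

-- the for-j loop of B: remaining parts, reconstructed prefix, its bracket depth
def pvLoopB : List (List Char) → List Char → Int → Option (List Char × List Char)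
  | [], _, _ => none
  | p :: rest, pre, depth =>
    if depth = 0 then some (pre, pvJoinC (p :: rest))
    else pvLoopB rest (pre ++ ':' :: p) (depth + pvCnt p)

def split_on_colon_py_alt (field_def : String) : String × String :=
  match pvSplitC field_def.toList with
  | [] => ("", "")  -- unreachable
  | h :: t =>
    match pvLoopB t h (pvCnt h) with
    | some (a, b) => (String.ofList a, String.ofList b)
    | none => ("", "")  -- Python raises ValueError here; excluded by Pre_

-- ===== PRECONDITION & SPEC =====
-- Pre_ = exactly the inputs on which A returns (there is a colon outside brackets);
-- elsewhere Python A raises ValueError.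
def Pre_split_on_colon_py (field_def : String) : Prop :=
  ∃ i, i < field_def.toList.length ∧ field_def.toList[i]! = ':' ∧
    ((field_def.toList.take i).count '[' : Int) = ((field_def.toList.take i).count ']' : Int)

instance (field_def : String) : Decidable (Pre_split_on_colon_py field_def) := by
  unfold Pre_split_on_colon_py; infer_instance

def pvWitness_split_on_colon_py : String := "a: list[int]"

def Spec_split_on_colon_py (field_def : String) (out : String × String) : Prop := out = split_on_colon_py_alt field_def
instance (field_def : String) (out : String × String) : Decidable (Spec_split_on_colon_py field_def out) := by unfold Spec_split_on_colon_py; infer_instance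

-- ===== CLAIM (what is proved, stated in full; the proofs are below) =====
def Claim_equal_split_on_colon_py : Prop := ∀ (field_def : String), Dom_split_on_colon_py field_def → Pre_split_on_colon_py field_def → Spec_split_on_colon_py field_def (split_on_colon_py field_def)

-- ===== LEMMAS AND PROOFS =====

-- depth contribution of one character
def pvDelta (c : Char) : Int := if c = '[' then 1 else if c = ']' then -1 else 0

-- reference splitter: first top-level colon, relative form
def pvFA : List Char → Int → Option (List Char × List Char)
  | [], _ => none
  | c :: rest, d =>
    if c = ':' ∧ d = 0 then some ([], rest)
    else (pvFA rest (d + pvDelta c)).map (fun p => (c :: p.1, p.2))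

theorem pvCnt_cons (c : Char) (p : List Char) : pvCnt (c :: p) = pvDelta c + pvCnt p := by
  simp [pvCnt, pvDelta, List.count_cons]
  split_ifs with h1 h2 <;> simp_all <;> push_cast <;> ring

theorem pvLoopA_eq (l : List Char) : ∀ (i : Nat) (d : Int),
    pvLoopA l i d = (pvFA l d).map (fun p => i + p.1.length) := by
  induction l with
  | nil => intro i d; simp [pvLoopA, pvFA]
  | cons c rest ih =>
    intro i d
    by_cases h1 : c = '['
    · subst h1
      rw [show pvLoopA ('[' :: rest) i d = pvLoopA rest (i+1) (d+1) from by simp [pvLoopA]]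
      rw [ih]
      have : pvFA ('[' :: rest) d = (pvFA rest (d + 1)).map (fun p => ('[' :: p.1, p.2)) := by
        simp [pvFA, pvDelta]
      rw [this]
      cases pvFA rest (d + 1) <;> simp <;> omega
    · by_cases h2 : c = ']'
      · subst h2
        rw [show pvLoopA (']' :: rest) i d = pvLoopA rest (i+1) (d-1) from by simp [pvLoopA]]
        rw [ih]
        have : pvFA (']' :: rest) d = (pvFA rest (d - 1)).map (fun p => (']' :: p.1, p.2)) := by
          simp [pvFA, pvDelta]
          congr 1 <;> ring_nf
        rw [this]
        cases pvFA rest (d - 1) <;> simp <;> omega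
      · by_cases h3 : c = ':' ∧ d = 0
        · obtain ⟨hc, hd⟩ := h3; subst hc; subst hd
          simp [pvLoopA, pvFA]
        · have hA : pvLoopA (c :: rest) i d = pvLoopA rest (i+1) d := by
            simp [pvLoopA, h1, h2, h3]
          have hF : pvFA (c :: rest) d = (pvFA rest d).map (fun p => (c :: p.1, p.2)) := by
            have hd : pvDelta c = 0 := by simp [pvDelta, h1, h2]
            simp [pvFA, h3, hd]
          rw [hA, ih, hF]
          cases pvFA rest d <;> simp <;> omega

theorem pvFA_decomp (l : List Char) : ∀ (d : Int) (a b : List Char),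
    pvFA l d = some (a, b) → l = a ++ ':' :: b := by
  induction l with
  | nil => intro d a b h; simp [pvFA] at h
  | cons c rest ih =>
    intro d a b h
    by_cases h3 : c = ':' ∧ d = 0
    · obtain ⟨hc, hd⟩ := h3; subst hc; subst hd
      simp [pvFA] at h
      obtain ⟨ha, hb⟩ := h; subst ha; subst hb; simp
    · have hfa : pvFA (c :: rest) d = (pvFA rest (d + pvDelta c)).map (fun p => (c :: p.1, p.2)) := by
        simp [pvFA, h3]
      rw [hfa] at h
      cases hf : pvFA rest (d + pvDelta c) with
      | none => rw [hf] at h; simp at h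
      | some p =>
        obtain ⟨p1, p2⟩ := p
        rw [hf] at h
        simp at h
        obtain ⟨h1, h2⟩ := h
        have hrest := ih _ _ _ hf
        rw [← h1, ← h2, hrest]
        simp

theorem pvSplitC_ne_nil (l : List Char) : pvSplitC l ≠ [] := by
  cases l with
  | nil => simp [pvSplitC]
  | cons c rest =>
    simp only [pvSplitC]
    cases pvSplitC rest <;> simp <;> split <;> simp

theorem pvJoinC_splitC (l : List Char) : pvJoinC (pvSplitC l) = l := by
  induction l with
  | nil => simp [pvSplitC, pvJoinC]
  | cons c rest ih =>
    cases hr : pvSplitC rest with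
    | nil => exact absurd hr (pvSplitC_ne_nil rest)
    | cons h' t' =>
      rw [hr] at ih
      by_cases hc : c = ':'
      · subst hc
        simp [pvSplitC, hr, pvJoinC, ih]
      · simp only [pvSplitC, hr, if_neg hc]
        cases t' with
        | nil => simpa [pvJoinC] using congrArg (c :: ·) ih
        | cons q t'' => simpa [pvJoinC] using congrArg (c :: ·) ih

theorem pvLoopB_eq (l : List Char) : ∀ (d : Int) (pre h : List Char) (t : List (List Char)),
    pvSplitC l = h :: t →
    pvLoopB t (pre ++ h) (d + pvCnt h) = (pvFA l d).map (fun p => (pre ++ p.1, p.2)) := by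
  induction l with
  | nil =>
    intro d pre h t hs
    simp [pvSplitC] at hs
    obtain ⟨hh, ht⟩ := hs; subst hh; subst ht
    simp [pvLoopB, pvFA]
  | cons c rest ih =>
    intro d pre h t hs
    cases hr : pvSplitC rest with
    | nil => exact absurd hr (pvSplitC_ne_nil rest)
    | cons h' t' =>
      by_cases hc : c = ':'
      · subst hc
        simp only [pvSplitC, hr] at hs
        obtain ⟨hh, ht⟩ := List.cons.inj hs
        subst hh; subst ht
        have hcnt : pvCnt ([] : List Char) = 0 := by simp [pvCnt]
        rw [hcnt]
        simp only [pvLoopB, List.append_nil, add_zero]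
        by_cases hd : d = 0
        · subst hd
          have : pvJoinC (h' :: t') = rest := by rw [← hr]; exact pvJoinC_splitC rest
          simp [pvFA, this]
        · rw [if_neg hd]
          have hdd : pvDelta ':' = 0 := by simp [pvDelta]
          have hfa : pvFA (':' :: rest) d = (pvFA rest d).map (fun p => (':' :: p.1, p.2)) := by
            simp [pvFA, hd, hdd]
          rw [hfa]
          have := ih d (pre ++ [':']) h' t' hr
          rw [show pre ++ ':' :: h' = (pre ++ [':']) ++ h' by simp, this]
          cases pvFA rest d with
          | none => rfl
          | some p => simp
      · simp only [pvSplitC, hr, if_neg hc] at hs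
        obtain ⟨hh, ht⟩ := List.cons.inj hs
        subst hh; subst ht
        rw [pvCnt_cons]
        rw [show pre ++ c :: h' = (pre ++ [c]) ++ h' by simp,
            show d + (pvDelta c + pvCnt h') = (d + pvDelta c) + pvCnt h' by ring]
        have := ih (d + pvDelta c) (pre ++ [c]) h' t' hr
        rw [this]
        have hfa : pvFA (c :: rest) d
            = (pvFA rest (d + pvDelta c)).map (fun p => (c :: p.1, p.2)) := by
          simp [pvFA, hc]
        rw [hfa]
        cases pvFA rest (d + pvDelta c) with
        | none => rfl
        | some p => simp

theorem pvCnt_take_eq (l : List Char) (i : Nat) :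
    pvCnt (l.take i) = ((l.take i).count '[' : Int) - ((l.take i).count ']' : Int) := rfl

theorem pvFA_isSome (l : List Char) : ∀ (d : Int),
    (∃ i, i < l.length ∧ l[i]! = ':' ∧ d + pvCnt (l.take i) = 0) → (pvFA l d).isSome := by
  induction l with
  | nil => intro d ⟨i, hi, _⟩; simp at hi
  | cons c rest ih =>
    intro d ⟨i, hi, hc, hd⟩
    cases i with
    | zero =>
      simp at hc
      subst hc
      simp [pvCnt] at hd
      simp [pvFA, hd]
    | succ j =>
      have hj : j < rest.length := by simpa using hi
      have hcj : rest[j]! = ':' := by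
        rw [← hc]
        simp
      have hdj : (d + pvDelta c) + pvCnt (rest.take j) = 0 := by
        have : (c :: rest).take (j + 1) = c :: rest.take j := rfl
        rw [this, pvCnt_cons] at hd
        omega
      have hrec := ih (d + pvDelta c) ⟨j, hj, hcj, hdj⟩
      by_cases h3 : c = ':' ∧ d = 0
      · simp [pvFA, h3]
      · simp only [pvFA, if_neg h3]
        simpa using hrec

-- ===== VERDICT (by name: the statement is the Claim_ definition above) =====
theorem split_on_colon_py_spec : Claim_equal_split_on_colon_py := by
  intro field_def _ hpre
  unfold Spec_split_on_colon_py
  obtain ⟨i, hi, hc, hcnt⟩ := hpre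
  have hsome : (pvFA field_def.toList 0).isSome := by
    apply pvFA_isSome field_def.toList 0
    refine ⟨i, hi, hc, ?_⟩
    rw [pvCnt_take_eq]
    omega
  obtain ⟨⟨a, b⟩, hab⟩ := Option.isSome_iff_exists.mp hsome
  have hdec : field_def.toList = a ++ ':' :: b := pvFA_decomp field_def.toList 0 a b hab
  -- A's value
  have hA : split_on_colon_py field_def
      = (String.ofList (field_def.toList.take a.length), String.ofList (field_def.toList.drop (a.length + 1))) := by
    unfold split_on_colon_py
    rw [pvLoopA_eq, hab]
    simp
  have htake : field_def.toList.take a.length = a := by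
    rw [hdec]; exact List.take_left
  have hdrop : field_def.toList.drop (a.length + 1) = b := by
    rw [hdec]
    rw [show a.length + 1 = (a ++ [':']).length by simp]
    rw [show a ++ ':' :: b = (a ++ [':']) ++ b by simp]
    exact List.drop_left
  -- B's value
  obtain ⟨h, t, hs⟩ : ∃ h t, pvSplitC field_def.toList = h :: t := by
    cases hsp : pvSplitC field_def.toList with
    | nil => exact absurd hsp (pvSplitC_ne_nil _)
    | cons h t => exact ⟨h, t, rfl⟩
  have hlb : pvLoopB t h (pvCnt h) = some (a, b) := by
    have := pvLoopB_eq field_def.toList 0 [] h t hs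
    simp only [List.nil_append, zero_add] at this
    rw [this, hab]
    simp
  have hB : split_on_colon_py_alt field_def = (String.ofList a, String.ofList b) := by
    unfold split_on_colon_py_alt
    rw [hs]
    simp [hlb]
  rw [hA, hB, htake, hdrop]
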